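-- pv_equiv track=rewrite | github.com/Silterman/Dodona-Ugent | Recursie.py | geisoleerde_cijfers
-- ===== SOURCE A (Python) =====
-- def geisoleerde_cijfers(string, n = 0, i = 1):
--     if i >= len(string)-1 or len(string) == 0:
--         return n
--     if i == 1:
--         if string[0].isdigit() and not string[1].isdigit():
--             n += 1
--         if string[-1].isdigit() and not string[-2].isdigit():
--             n += 1
--     if string[i].isdigit() and not (string[i-1].isdigit() or string[i+1].isdigit()):
--         n += 1
--     i += 1
--     return geisoleerde_cijfers(string, n = n, i = i)
-- ===== SOURCE B (Python) =====
-- def geisoleerde_cijfers(string, n=0, i=1):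
--     L = len(string)
--     if L == 0 or i >= L - 1:
--         return n
--     total = n
--     if i <= 1 and L >= 3:
--         total += string[0].isdigit() and not string[1].isdigit()
--         total += string[-1].isdigit() and not string[-2].isdigit()
--     total += sum(1 for j in range(i, L - 1)
--                  if string[j].isdigit() and not (string[j-1].isdigit() or string[j+1].isdigit()))
--     return total
-- ===== Notes on version B (the rewrite author's own statement) =====
-- stated objective: simpler
-- what changed: A's tail recursion threading (n, i) through recursive calls is replaced by a non-recursive closed form: a one-shot endpoint bonus (taken when the scan would pass index 1) plus a single generator-sum count over range(i, len-1).
import Mathlib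
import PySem

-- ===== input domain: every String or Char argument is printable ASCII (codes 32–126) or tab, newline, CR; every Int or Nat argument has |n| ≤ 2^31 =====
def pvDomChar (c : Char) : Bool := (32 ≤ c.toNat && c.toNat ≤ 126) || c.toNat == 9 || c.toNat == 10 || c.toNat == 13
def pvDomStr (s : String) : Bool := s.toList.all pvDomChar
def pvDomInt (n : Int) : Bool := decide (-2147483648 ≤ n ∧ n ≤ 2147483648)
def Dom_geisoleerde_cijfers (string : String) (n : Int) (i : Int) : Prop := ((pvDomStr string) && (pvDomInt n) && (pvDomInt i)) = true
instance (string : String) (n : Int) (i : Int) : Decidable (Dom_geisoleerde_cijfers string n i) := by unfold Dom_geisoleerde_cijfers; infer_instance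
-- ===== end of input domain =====

-- B replaces A's tail recursion by a closed-form split: endpoint bonus computed once plus a single range count (objective: simpler).

-- shared digit test: string[j].isdigit() with Python indexing; the default ' ' (not a digit) is
-- only read outside Pre_, where Python raises IndexError.
def pvDig (s : List Char) (j : Int) : Bool := PySem.Chars.isdigit (PySem.List.pyGetD s j ' ')

-- ===== PORT A =====
def pvGCrec (s : List Char) (n : Int) (i : Int) : Int :=
  if h : i ≥ (s.length : Int) - 1 ∨ s.length = 0 then n
  else
    let n1 := if i = 1 then
        (let na := if pvDig s 0 && !pvDig s 1 then n + 1 else n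
         if pvDig s (-1) && !pvDig s (-2) then na + 1 else na)
      else n
    let n2 := if pvDig s i && !(pvDig s (i - 1) || pvDig s (i + 1)) then n1 + 1 else n1
    pvGCrec s n2 (i + 1)
termination_by ((s.length : Int) - 1 - i).toNat
decreasing_by
  simp only [not_or, not_le] at h
  omega

def geisoleerde_cijfers (string : String) (n : Int) (i : Int) : Int :=
  pvGCrec string.toList n i

-- ===== PORT B =====
def pvAltL (s : List Char) (n : Int) (i : Int) : Int :=
  let L : Int := s.length
  if L = 0 ∨ i ≥ L - 1 then n
  else
    let total := n + (if i ≤ 1 ∧ 3 ≤ L then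
        (if pvDig s 0 && !pvDig s 1 then (1 : Int) else 0)
        + (if pvDig s (-1) && !pvDig s (-2) then (1 : Int) else 0) else 0)
    total + ((PySem.List.pyRange i (L - 1) 1).countP
        (fun j => pvDig s j && !(pvDig s (j - 1) || pvDig s (j + 1))) : Int)

def geisoleerde_cijfers_alt (string : String) (n : Int) (i : Int) : Int :=
  pvAltL string.toList n i

-- ===== PRECONDITION & SPEC =====
-- Pre_ excludes exactly the inputs on which the Python A raises IndexError: a start index i below
-- -len(string), or i = -len(string) with a digit first character (string[i-1] then reads index -len-1).
def Pre_geisoleerde_cijfers (string : String) (n : Int) (i : Int) : Prop :=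
  string.toList.length = 0 ∨ 1 - (string.toList.length : Int) ≤ i ∨
    (i = -(string.toList.length : Int) ∧ PySem.Chars.isdigit (string.toList.headD ' ') = false)
instance (string : String) (n : Int) (i : Int) : Decidable (Pre_geisoleerde_cijfers string n i) := by
  unfold Pre_geisoleerde_cijfers; infer_instance

def pvWitness_geisoleerde_cijfers : String × Int × Int := ("a1b", 0, 1)

def Spec_geisoleerde_cijfers (string : String) (n : Int) (i : Int) (out : Int) : Prop := out = geisoleerde_cijfers_alt string n i
instance (string : String) (n : Int) (i : Int) (out : Int) : Decidable (Spec_geisoleerde_cijfers string n i out) := by unfold Spec_geisoleerde_cijfers; infer_instance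

-- ===== CLAIM (what is proved, stated in full; the proofs are below) =====
def Claim_equal_geisoleerde_cijfers : Prop := ∀ (string : String) (n : Int) (i : Int), Dom_geisoleerde_cijfers string n i → Pre_geisoleerde_cijfers string n i → Spec_geisoleerde_cijfers string n i (geisoleerde_cijfers string n i)

-- ===== LEMMAS AND PROOFS =====

-- endpoint bonus (both programs compute it, A at step i = 1, B up front)
def pvP (s : List Char) : Int :=
  (if pvDig s 0 && !pvDig s 1 then (1 : Int) else 0)
  + (if pvDig s (-1) && !pvDig s (-2) then (1 : Int) else 0)

-- A's one unfolding step, with the new accumulator written arithmetically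
theorem pvGCrec_step (s : List Char) (n i : Int)
    (h : ¬ (i ≥ (s.length : Int) - 1 ∨ s.length = 0)) :
    pvGCrec s n i = pvGCrec s
      (n + (if i = 1 then pvP s else 0)
         + (if pvDig s i && !(pvDig s (i - 1) || pvDig s (i + 1)) then 1 else 0)) (i + 1) := by
  rw [pvGCrec, dif_neg h]
  simp only [pvP]
  split_ifs <;> ring_nf

theorem pvGCrec_stop (s : List Char) (n i : Int)
    (h : i ≥ (s.length : Int) - 1 ∨ s.length = 0) :
    pvGCrec s n i = n := by
  rw [pvGCrec, dif_pos h]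

-- B's value absorbs A's step: adding A's step-i increments to the accumulator and starting at i+1
-- gives the same value as starting at i.
theorem pvAltL_step (s : List Char) (n i : Int)
    (h : ¬ (i ≥ (s.length : Int) - 1 ∨ s.length = 0)) :
    pvAltL s
      (n + (if i = 1 then pvP s else 0)
         + (if pvDig s i && !(pvDig s (i - 1) || pvDig s (i + 1)) then 1 else 0)) (i + 1)
    = pvAltL s n i := by
  simp only [not_or, not_le] at h
  obtain ⟨hi, hL⟩ := h
  have hL1 : 1 ≤ (s.length : Int) := by omega
  have hcons : PySem.List.pyRange i ((s.length : Int) - 1) 1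
      = i :: PySem.List.pyRange (i + 1) ((s.length : Int) - 1) 1 :=
    PySem.List.pyRange_one_cons (by omega)
  simp only [pvAltL, pvP, hcons, List.countP_cons]
  by_cases h2 : i + 1 ≥ (s.length : Int) - 1
  · -- last iteration: i = len - 2, the remaining range is empty
    have hnil : PySem.List.pyRange (i + 1) ((s.length : Int) - 1) 1 = [] :=
      PySem.List.pyRange_one_eq_nil (by omega)
    rw [if_pos (Or.inr h2), if_neg (by omega : ¬ ((s.length : Int) = 0 ∨ i ≥ (s.length : Int) - 1))]
    simp only [hnil, List.countP_nil]
    split_ifs <;> push_cast <;> omega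
  · rw [if_neg (by omega : ¬ ((s.length : Int) = 0 ∨ i + 1 ≥ (s.length : Int) - 1)),
        if_neg (by omega : ¬ ((s.length : Int) = 0 ∨ i ≥ (s.length : Int) - 1))]
    split_ifs <;> push_cast <;> omega

-- main equivalence, by induction on the number of remaining iterations
theorem pvMain (s : List Char) (k : Nat) : ∀ n i : Int,
    (((s.length : Int) - 1 - i).toNat = k) →
    (s.length = 0 ∨ 1 - (s.length : Int) ≤ i ∨
      (i = -(s.length : Int) ∧ PySem.Chars.isdigit (s.headD ' ') = false)) →
    pvGCrec s n i = pvAltL s n i := by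
  induction k with
  | zero =>
    intro n i hk _
    have h : i ≥ (s.length : Int) - 1 ∨ s.length = 0 := by omega
    rw [pvGCrec_stop s n i h, pvAltL]
    rw [if_pos (by omega : (s.length : Int) = 0 ∨ i ≥ (s.length : Int) - 1)]
  | succ k ih =>
    intro n i hk hpre
    by_cases hL : s.length = 0
    · rw [pvGCrec_stop s n i (Or.inr hL), pvAltL]
      rw [if_pos (by omega : (s.length : Int) = 0 ∨ i ≥ (s.length : Int) - 1)]
    have h : ¬ (i ≥ (s.length : Int) - 1 ∨ s.length = 0) := by omega
    have hpre' : s.length = 0 ∨ 1 - (s.length : Int) ≤ i + 1 ∨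
        (i + 1 = -(s.length : Int) ∧ PySem.Chars.isdigit (s.headD ' ') = false) := by
      rcases hpre with h0 | h1 | ⟨h2, _⟩
      · exact Or.inl h0
      · exact Or.inr (Or.inl (by omega))
      · exact Or.inr (Or.inl (by omega))
    rw [pvGCrec_step s n i h, ih _ (i + 1) (by simp only [not_or, not_le] at h; omega) hpre', pvAltL_step s n i h]

-- ===== VERDICT (by name: the statement is the Claim_ definition above) =====
theorem geisoleerde_cijfers_spec : Claim_equal_geisoleerde_cijfers := by
  intro string n i _ hpre
  unfold Spec_geisoleerde_cijfers geisoleerde_cijfers geisoleerde_cijfers_alt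
  exact pvMain string.toList _ n i rfl hpre
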